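-- pv_equiv track=rewrite | github.com/AnthonyNeu/LintCode | Python/Maximum Subarray Difference.py | maxDiffSubArrays
-- ===== SOURCE A (Python) =====
-- def maxDiffSubArrays(nums):
--     # write your code here
--     if not nums or len(nums) <= 1:
--         return 0
--     length = len(nums)
--     max_ending_here, min_ending_here = [nums[0]], [nums[0]]
--     for i in range(1, length):
--         max_ending_here.append(max(max_ending_here[-1] + nums[i], nums[i]))
--         min_ending_here.append(min(min_ending_here[-1] + nums[i], nums[i]))
--     max_starting_here, min_starting_here = [nums[-1]], [nums[-1]]
--     for i in reversed(range(length - 1)):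
--         max_starting_here = [max(max_starting_here[0] + nums[i], nums[i])] + max_starting_here
--         min_starting_here = [min(min_starting_here[0] + nums[i], nums[i])] + min_starting_here
--     # there are two situations
--     # the max sum array in the previous
--     # or in the latter
--     max_difference = max([abs(a - b) for a, b in zip(max_ending_here[:length - 1], min_starting_here[1:length])])
--     _max_difference = max([abs(a - b) for a, b in zip(min_ending_here[:length - 1], max_starting_here[1:length])])
--     return max(max_difference, _max_difference)
-- ===== SOURCE B (Python) =====
-- def maxDiffSubArrays(nums):
--     # Prefix-sum reformulation: the best subarray sum ending at i is
--     # P[i+1] - min(P[0..i]) and the best one starting at j is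
--     # (min/max of P[j+1..n]) - P[j], where P is the prefix-sum array.
--     # So the answer needs only P, its running prefix extrema and its
--     # running suffix extrema -- no Kadane recurrence and no DP arrays
--     # of subarray sums.
--     n = len(nums)
--     if n <= 1:
--         return 0
--     P = [0]
--     for x in nums:
--         P.append(P[-1] + x)
--     lo = hi = 0
--     loP, hiP = [], []
--     for p in P:
--         lo = min(lo, p)
--         hi = max(hi, p)
--         loP.append(lo)
--         hiP.append(hi)
--     best = 0
--     minSuf = maxSuf = P[-1]
--     for q, l, h in reversed(list(zip(P[1:], loP, hiP))[:-1]):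
--         best = max(max(best, abs((q - l) - (minSuf - q))), abs((q - h) - (maxSuf - q)))
--         minSuf = min(minSuf, q)
--         maxSuf = max(maxSuf, q)
--     return best
-- ===== Notes on version B (the rewrite author's own statement) =====
-- stated objective: faster
-- what changed: B drops A's Kadane-style DP (four best-subarray-sum arrays, suffix ones built by O(n) prepends) and instead works on the prefix-sum array P: best sum ending at i is P[i+1]-min(P[0..i]) and best sum starting at j is extremum(P[j+1..n])-P[j], so three linear passes over P with running prefix/suffix extrema give the answer.
import Mathlib
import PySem

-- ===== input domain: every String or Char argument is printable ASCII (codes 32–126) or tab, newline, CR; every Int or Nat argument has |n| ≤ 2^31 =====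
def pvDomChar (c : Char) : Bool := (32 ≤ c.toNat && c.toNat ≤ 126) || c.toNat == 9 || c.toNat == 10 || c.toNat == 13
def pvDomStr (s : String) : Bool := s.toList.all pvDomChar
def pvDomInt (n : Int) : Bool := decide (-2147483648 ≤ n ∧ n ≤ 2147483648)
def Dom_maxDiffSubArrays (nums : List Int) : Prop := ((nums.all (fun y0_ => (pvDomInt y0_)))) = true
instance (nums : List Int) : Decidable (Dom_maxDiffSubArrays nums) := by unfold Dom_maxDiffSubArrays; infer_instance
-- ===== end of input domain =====

-- B replaces A's Kadane-style DP arrays (suffix ones built by quadratic prepends) with a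
-- prefix-sum reformulation: best sums come from the prefix-sum array and its running
-- prefix/suffix extrema, in three linear passes (objective: faster, asymptotic).

-- ===== PORT A =====
-- Python `max(lst)` on a list that is provably nonempty here is ported as `(PySem.List.max? lst (fun v => v)).getD 0`;
-- the `.getD 0` branch is unreachable for `nums.length ≥ 2`.
def maxDiffSubArrays (nums : List Int) : Int :=
  if nums = [] ∨ (nums.length : Int) ≤ 1 then 0
  else
    let length : Int := nums.length
    let fwd := (PySem.List.pyRange 1 length 1).foldl
      (fun (st : List Int × List Int) i =>
        (st.1 ++ [max (PySem.List.pyGetD st.1 (-1) 0 + PySem.List.pyGetD nums i 0) (PySem.List.pyGetD nums i 0)],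
         st.2 ++ [min (PySem.List.pyGetD st.2 (-1) 0 + PySem.List.pyGetD nums i 0) (PySem.List.pyGetD nums i 0)]))
      ([PySem.List.pyGetD nums 0 0], [PySem.List.pyGetD nums 0 0])
    let bwd := ((PySem.List.pyRange 0 (length - 1) 1).reverse).foldl
      (fun (st : List Int × List Int) i =>
        ([max (PySem.List.pyGetD st.1 0 0 + PySem.List.pyGetD nums i 0) (PySem.List.pyGetD nums i 0)] ++ st.1,
         [min (PySem.List.pyGetD st.2 0 0 + PySem.List.pyGetD nums i 0) (PySem.List.pyGetD nums i 0)] ++ st.2))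
      ([PySem.List.pyGetD nums (-1) 0], [PySem.List.pyGetD nums (-1) 0])
    let maxDifference :=
      (PySem.List.max? (((PySem.List.slice fwd.1 none (some (length - 1))).zip
        (PySem.List.slice bwd.2 (some 1) (some length))).map (fun p => |p.1 - p.2|)) (fun v => v)).getD 0
    let maxDifference' :=
      (PySem.List.max? (((PySem.List.slice fwd.2 none (some (length - 1))).zip
        (PySem.List.slice bwd.1 (some 1) (some length))).map (fun p => |p.1 - p.2|)) (fun v => v)).getD 0
    max maxDifference maxDifference'

-- ===== PORT B =====
-- Source B's triple zip(P[1:], loP, hiP) is modelled as nested pairs P[1:] × (loP × hiP).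
def maxDiffSubArrays_alt (nums : List Int) : Int :=
  if (nums.length : Int) ≤ 1 then 0
  else
    let P := nums.foldl (fun (P : List Int) x => P ++ [PySem.List.pyGetD P (-1) 0 + x]) [0]
    let sc := P.foldl
      (fun (st : (Int × Int) × (List Int × List Int)) p =>
        ((min st.1.1 p, max st.1.2 p),
         (st.2.1 ++ [min st.1.1 p], st.2.2 ++ [max st.1.2 p])))
      ((0, 0), ([], []))
    let z := PySem.List.pyGetD P (-1) 0
    let res := ((PySem.List.slice ((PySem.List.slice P (some 1) none).zip (sc.2.1.zip sc.2.2)) none (some (-1))).reverse).foldl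
      (fun (st : Int × Int × Int) u =>
        (max (max st.1 |(u.1 - u.2.1) - (st.2.1 - u.1)|) |(u.1 - u.2.2) - (st.2.2 - u.1)|,
         min st.2.1 u.1,
         max st.2.2 u.1))
      (0, z, z)
    res.1

-- ===== PRECONDITION & SPEC =====
def Spec_maxDiffSubArrays (nums : List Int) (out : Int) : Prop := out = maxDiffSubArrays_alt nums
instance (nums : List Int) (out : Int) : Decidable (Spec_maxDiffSubArrays nums out) := by unfold Spec_maxDiffSubArrays; infer_instance

-- ===== CLAIM (what is proved, stated in full; the proofs are below) =====
def Claim_equal_maxDiffSubArrays : Prop := ∀ (nums : List Int), Dom_maxDiffSubArrays nums → Spec_maxDiffSubArrays nums (maxDiffSubArrays nums)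

-- ===== LEMMAS AND PROOFS =====

-- best subarray sums ending at each position after the first (Kadane prefix scan, head value `a` given)
def pvTMax (a : Int) : List Int → List Int
  | [] => []
  | x :: t => max (a + x) x :: pvTMax (max (a + x) x) t

def pvTMin (a : Int) : List Int → List Int
  | [] => []
  | x :: t => min (a + x) x :: pvTMin (min (a + x) x) t

-- best subarray sum starting at position 0 of `xs ++ [z]`
def pvHMax : List Int → Int → Int
  | [], z => z
  | x :: t, z => max (pvHMax t z + x) x

def pvHMin : List Int → Int → Int
  | [], z => z
  | x :: t, z => min (pvHMin t z + x) x

-- the per-position suffix lists of `xs ++ [z]`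
def pvGMax : List Int → Int → List Int
  | [], z => [z]
  | x :: t, z => max (pvHMax t z + x) x :: pvGMax t z

def pvGMin : List Int → Int → List Int
  | [], z => [z]
  | x :: t, z => min (pvHMin t z + x) x :: pvGMin t z

-- the interleaved running maximum A's two comprehensions compute
def pvBest (b0 : Int) : List Int → List Int → List Int → Int → Int
  | [], _, _, _ => b0
  | _ :: xs, e :: es, f :: fs, z =>
      max (max (pvBest b0 xs es fs z) |e - pvHMin xs z|) |f - pvHMax xs z|
  | _ :: _, _, _, _ => b0

-- ===== canonical forms of B's prefix-sum passes =====
-- prefix sums of the list, starting after accumulated sum `a` (P without its leading entry)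
def pvP (a : Int) : List Int → List Int
  | [] => []
  | x :: t => (a + x) :: pvP (a + x) t

-- running minima / maxima lists over a list, seeded with `lo` / `hi`
def pvLo (lo : Int) : List Int → List Int
  | [] => []
  | p :: t => min lo p :: pvLo (min lo p) t

def pvHi (hi : Int) : List Int → List Int
  | [] => []
  | p :: t => max hi p :: pvHi (max hi p) t

def pvFLo (lo : Int) : List Int → Int
  | [] => lo
  | p :: t => pvFLo (min lo p) t

def pvFHi (hi : Int) : List Int → Int
  | [] => hi
  | p :: t => pvFHi (max hi p) t

-- the triples (P[i+1], min P[0..i], max P[0..i]) that B's last loop consumes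
def pvTrip (p lo hi : Int) : List Int → List (Int × Int × Int)
  | [] => []
  | x :: t => (p + x, min lo p, max hi p) :: pvTrip (p + x) (min lo p) (max hi p) t

-- B's backward loop as a structural recursion: (best, minSuf, maxSuf)
def pvBB (z' : Int) : List (Int × Int × Int) → Int × Int × Int
  | [] => (0, z', z')
  | u :: t =>
      let r := pvBB z' t
      (max (max r.1 |(u.1 - u.2.1) - (r.2.1 - u.1)|) |(u.1 - u.2.2) - (r.2.2 - u.1)|,
       min r.2.1 u.1, max r.2.2 u.1)

-- max-ending / min-ending values written through prefix sums: P[i+1] - extremum(P[0..i])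
def pvMEscan (p lo : Int) : List Int → List Int
  | [] => []
  | x :: t => (p + x - min lo p) :: pvMEscan (p + x) (min lo p) t

def pvmEscan (p hi : Int) : List Int → List Int
  | [] => []
  | x :: t => (p + x - max hi p) :: pvmEscan (p + x) (max hi p) t

-- total of `l ++ [z]` and extrema of its proper suffix sums
def pvSum : List Int → Int → Int
  | [], z => z
  | x :: t, z => x + pvSum t z

def pvMaxT : List Int → Int → Int
  | [], _ => 0
  | _ :: t, z => max (pvSum t z) (pvMaxT t z)

def pvMinT : List Int → Int → Int
  | [], _ => 0
  | _ :: t, z => min (pvSum t z) (pvMinT t z)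

theorem pvTMax_length (a : Int) (t : List Int) : (pvTMax a t).length = t.length := by
  induction t generalizing a with
  | nil => rfl
  | cons x t ih => simp [pvTMax, ih]

theorem pvTMin_length (a : Int) (t : List Int) : (pvTMin a t).length = t.length := by
  induction t generalizing a with
  | nil => rfl
  | cons x t ih => simp [pvTMin, ih]

theorem pvGMax_head (l : List Int) (z : Int) : PySem.List.pyGetD (pvGMax l z) 0 0 = pvHMax l z := by
  cases l <;> simp [pvGMax, pvHMax, PySem.List.pyGetD_zero_cons]

theorem pvGMin_head (l : List Int) (z : Int) : PySem.List.pyGetD (pvGMin l z) 0 0 = pvHMin l z := by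
  cases l <;> simp [pvGMin, pvHMin, PySem.List.pyGetD_zero_cons]

theorem pvGMax_length (l : List Int) (z : Int) : (pvGMax l z).length = l.length + 1 := by
  induction l with
  | nil => rfl
  | cons x t ih => simp [pvGMax, ih]

theorem pvGMin_length (l : List Int) (z : Int) : (pvGMin l z).length = l.length + 1 := by
  induction l with
  | nil => rfl
  | cons x t ih => simp [pvGMin, ih]

-- `(pyRange 1 n 1).map (nums[·])` is `nums.tail`
theorem pvMapRangeTail (nums : List Int) :
    (PySem.List.pyRange 1 (nums.length : Int) 1).map (fun i => PySem.List.pyGetD nums i 0) = nums.tail := by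
  rw [PySem.List.pyRange_one]
  apply List.ext_getElem
  · simp
  · intro i h1 h2
    simp only [List.getElem_map, List.getElem_range]
    have hc : (1 : Int) + (i : Int) = ((1 + i : Nat) : Int) := by push_cast; ring
    rw [hc, PySem.List.pyGetD_natCast]
    have hlt : 1 + i < nums.length := by
      simp at h1; omega
    rw [List.getD_eq_getElem nums 0 hlt, List.getElem_tail]
    congr 1
    omega

-- `(pyRange 0 (n-1) 1).map (nums[·])` is `nums.dropLast`
theorem pvMapRangeDropLast (nums : List Int) :
    (PySem.List.pyRange 0 ((nums.length : Int) - 1) 1).map (fun i => PySem.List.pyGetD nums i 0) = nums.dropLast := by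
  rw [PySem.List.pyRange_one]
  apply List.ext_getElem
  · simp
  · intro i h1 h2
    simp only [List.getElem_map, List.getElem_range]
    have hc : (0 : Int) + (i : Int) = ((i : Nat) : Int) := by ring
    rw [hc, PySem.List.pyGetD_natCast]
    have hlt : i < nums.length := by
      simp at h1; omega
    rw [List.getD_eq_getElem nums 0 hlt, List.getElem_dropLast]

-- A's forward loop
theorem pvFwdA (t : List Int) (a b : Int) (l1 l2 : List Int) :
    t.foldl (fun (st : List Int × List Int) x =>
        (st.1 ++ [max (PySem.List.pyGetD st.1 (-1) 0 + x) x],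
         st.2 ++ [min (PySem.List.pyGetD st.2 (-1) 0 + x) x]))
      (l1 ++ [a], l2 ++ [b])
    = (l1 ++ a :: pvTMax a t, l2 ++ b :: pvTMin b t) := by
  induction t generalizing a b l1 l2 with
  | nil => simp [pvTMax, pvTMin]
  | cons x t ih =>
    simp only [List.foldl_cons, PySem.List.pyGetD_neg_one_append_singleton]
    have := ih (max (a + x) x) (min (b + x) x) (l1 ++ [a]) (l2 ++ [b])
    simpa [pvTMax, pvTMin] using this

-- A's backward loop (as a foldr over the values)
theorem pvBwdA (xs : List Int) (z : Int) :
    xs.foldr (fun x (st : List Int × List Int) =>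
        ([max (PySem.List.pyGetD st.1 0 0 + x) x] ++ st.1,
         [min (PySem.List.pyGetD st.2 0 0 + x) x] ++ st.2))
      ([z], [z])
    = (pvGMax xs z, pvGMin xs z) := by
  induction xs with
  | nil => simp [pvGMax, pvGMin]
  | cons x t ih =>
    simp only [List.foldr_cons, ih]
    simp [pvGMax, pvGMin, pvGMax_head, pvGMin_head]

theorem pvFoldlMaxShift (t : List Int) (a b : Int) :
    t.foldl max (max a b) = max a (t.foldl max b) := by
  induction t generalizing b with
  | nil => rfl
  | cons x t ih =>
    simp only [List.foldl_cons]
    rw [max_assoc, ih]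

-- running max over a nonempty cons
theorem pvMaxlistCons (d d' : Int) (rest : List Int) :
    ((PySem.List.max? (d :: d' :: rest) (fun v => v)).getD 0)
    = max d ((PySem.List.max? (d' :: rest) (fun v => v)).getD 0) := by
  simp only [PySem.List.max?_id_cons, List.foldl_cons, Option.getD_some]
  exact pvFoldlMaxShift rest d d'

theorem pvGMin_ne_nil (l : List Int) (z : Int) : pvGMin l z ≠ [] := by
  cases l <;> simp [pvGMin]

theorem pvGMax_ne_nil (l : List Int) (z : Int) : pvGMax l z ≠ [] := by
  cases l <;> simp [pvGMax]

-- A's pair of list maxima equals pvBest with floor 0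
theorem pvMaxPair (xs es fs : List Int) (z : Int)
    (he : xs.length = es.length) (hf : xs.length = fs.length) (hne : xs ≠ []) :
    max ((PySem.List.max? ((es.zip (pvGMin xs z).tail).map (fun p => |p.1 - p.2|)) (fun v => v)).getD 0)
        ((PySem.List.max? ((fs.zip (pvGMax xs z).tail).map (fun p => |p.1 - p.2|)) (fun v => v)).getD 0)
    = pvBest 0 xs es fs z := by
  induction xs generalizing es fs with
  | nil => exact absurd rfl hne
  | cons x t ih =>
    cases es with
    | nil => simp at he
    | cons e es =>
      cases fs with
      | nil => simp at hf
      | cons f fs =>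
        cases t with
        | nil =>
          cases es with
          | cons _ _ => simp at he
          | nil =>
            cases fs with
            | cons _ _ => simp at hf
            | nil =>
              simp [pvGMin, pvGMax, pvBest, pvHMin, pvHMax, PySem.List.max?_id_cons]
        | cons y t' =>
          cases es with
          | nil => simp at he
          | cons e' es' =>
            cases fs with
            | nil => simp at hf
            | cons f' fs' =>
              have ihh := ih (e' :: es') (f' :: fs') (by simpa using he) (by simpa using hf) (by simp)
              obtain ⟨c, r, hc⟩ := List.exists_cons_of_ne_nil (pvGMin_ne_nil t' z)
              obtain ⟨c2, r2, hc2⟩ := List.exists_cons_of_ne_nil (pvGMax_ne_nil t' z)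
              simp only [pvGMin, pvGMax, List.tail_cons] at ihh ⊢
              rw [hc, hc2] at ihh ⊢
              simp only [List.zip_cons_cons, List.map_cons] at ihh ⊢
              rw [pvMaxlistCons, pvMaxlistCons]
              rw [show pvBest 0 (x :: y :: t') (e :: e' :: es') (f :: f' :: fs') z
                    = max (max (pvBest 0 (y :: t') (e' :: es') (f' :: fs') z)
                        |e - pvHMin (y :: t') z|) |f - pvHMax (y :: t') z| from rfl]
              rw [← ihh]
              simp only [pvHMin, pvHMax]
              ac_rfl

theorem pvTakeLen {α : Type} (l : List α) (n : Nat) (h : l.length = n) :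
    l.take (n - 1) = l.dropLast := by
  subst h
  exact List.dropLast_eq_take.symm

-- ===== B-side lemmas =====

-- Kadane's recurrence written through prefix sums
theorem pvKadaneMax (t : List Int) (p lo : Int) : pvTMax (p - lo) t = pvMEscan p lo t := by
  induction t generalizing p lo with
  | nil => rfl
  | cons x t ih =>
    have h : max (p - lo + x) x = p + x - min lo p := by
      rcases le_total lo p with h' | h' <;> simp [min_eq_left, min_eq_right, h'] <;> omega
    simp only [pvTMax, pvMEscan, h]
    rw [show p + x - min lo p = (p + x) - min lo p from rfl, ih (p + x) (min lo p)]

theorem pvKadaneMin (t : List Int) (p hi : Int) : pvTMin (p - hi) t = pvmEscan p hi t := by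
  induction t generalizing p hi with
  | nil => rfl
  | cons x t ih =>
    have h : min (p - hi + x) x = p + x - max hi p := by
      rcases le_total hi p with h' | h' <;> simp [max_eq_left, max_eq_right, h'] <;> omega
    simp only [pvTMin, pvmEscan, h]
    rw [show p + x - max hi p = (p + x) - max hi p from rfl, ih (p + x) (max hi p)]

-- best starting sums through suffix sums
theorem pvHMinChar (l : List Int) (z : Int) : pvHMin l z = pvSum l z - pvMaxT l z := by
  induction l with
  | nil => simp [pvHMin, pvSum, pvMaxT]
  | cons x t ih =>
    simp only [pvHMin, pvSum, pvMaxT, ih]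
    rcases le_total (pvSum t z) (pvMaxT t z) with h | h <;>
      simp [max_eq_left, max_eq_right, h] <;> omega

theorem pvHMaxChar (l : List Int) (z : Int) : pvHMax l z = pvSum l z - pvMinT l z := by
  induction l with
  | nil => simp [pvHMax, pvSum, pvMinT]
  | cons x t ih =>
    simp only [pvHMax, pvSum, pvMinT, ih]
    rcases le_total (pvSum t z) (pvMinT t z) with h | h <;>
      simp [min_eq_left, min_eq_right, h] <;> omega

-- B's prefix-sum building loop
theorem pvPfold (t : List Int) (a : Int) (l : List Int) :
    t.foldl (fun (P : List Int) x => P ++ [PySem.List.pyGetD P (-1) 0 + x]) (l ++ [a])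
    = l ++ a :: pvP a t := by
  induction t generalizing a l with
  | nil => simp [pvP]
  | cons x t ih =>
    simp only [List.foldl_cons, PySem.List.pyGetD_neg_one_append_singleton]
    have := ih (a + x) (l ++ [a])
    simpa [pvP] using this

-- B's running-extrema loop
theorem pvScanFold (l : List Int) (lo hi : Int) (l1 l2 : List Int) :
    l.foldl (fun (st : (Int × Int) × (List Int × List Int)) p =>
        ((min st.1.1 p, max st.1.2 p),
         (st.2.1 ++ [min st.1.1 p], st.2.2 ++ [max st.1.2 p])))
      ((lo, hi), (l1, l2))
    = ((pvFLo lo l, pvFHi hi l), (l1 ++ pvLo lo l, l2 ++ pvHi hi l)) := by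
  induction l generalizing lo hi l1 l2 with
  | nil => simp [pvFLo, pvFHi, pvLo, pvHi]
  | cons p l ih =>
    simp only [List.foldl_cons]
    have := ih (min lo p) (max hi p) (l1 ++ [min lo p]) (l2 ++ [max hi p])
    simpa [pvFLo, pvFHi, pvLo, pvHi] using this

-- the zip of P[1:] with the running extrema of P is pvTrip
theorem pvZipTrip (l : List Int) (p lo hi : Int) :
    (pvP p l).zip ((pvLo lo (p :: pvP p l)).zip (pvHi hi (p :: pvP p l))) = pvTrip p lo hi l := by
  induction l generalizing p lo hi with
  | nil => rfl
  | cons x t ih =>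
    simp only [pvP, pvLo, pvHi, pvTrip, List.zip_cons_cons]
    exact congrArg _ (ih (p + x) (min lo p) (max hi p))

theorem pvTrip_dropLast (l : List Int) (p lo hi : Int) :
    (pvTrip p lo hi l).dropLast = pvTrip p lo hi l.dropLast := by
  induction l generalizing p lo hi with
  | nil => rfl
  | cons x t ih =>
    cases t with
    | nil => rfl
    | cons y t' =>
      show ((p + x, min lo p, max hi p) :: pvTrip (p + x) (min lo p) (max hi p) (y :: t')).dropLast
          = pvTrip p lo hi (x :: (y :: t').dropLast)
      rw [List.dropLast_cons_of_ne_nil (l := pvTrip (p + x) (min lo p) (max hi p) (y :: t')) (by simp [pvTrip]), ih]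
      rfl

theorem pvMEscan_dropLast (l : List Int) (p lo : Int) :
    (pvMEscan p lo l).dropLast = pvMEscan p lo l.dropLast := by
  induction l generalizing p lo with
  | nil => rfl
  | cons x t ih =>
    cases t with
    | nil => rfl
    | cons y t' =>
      show ((p + x - min lo p) :: pvMEscan (p + x) (min lo p) (y :: t')).dropLast
          = pvMEscan p lo (x :: (y :: t').dropLast)
      rw [List.dropLast_cons_of_ne_nil (l := pvMEscan (p + x) (min lo p) (y :: t')) (by simp [pvMEscan]), ih]
      rfl

theorem pvmEscan_dropLast (l : List Int) (p hi : Int) :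
    (pvmEscan p hi l).dropLast = pvmEscan p hi l.dropLast := by
  induction l generalizing p hi with
  | nil => rfl
  | cons x t ih =>
    cases t with
    | nil => rfl
    | cons y t' =>
      show ((p + x - max hi p) :: pvmEscan (p + x) (max hi p) (y :: t')).dropLast
          = pvmEscan p hi (x :: (y :: t').dropLast)
      rw [List.dropLast_cons_of_ne_nil (l := pvmEscan (p + x) (max hi p) (y :: t')) (by simp [pvmEscan]), ih]
      rfl

-- appending the last element to the prefix-sum list
theorem pvP_snoc (l : List Int) (a z : Int) :
    pvP a (l ++ [z]) = pvP a l ++ [a + l.sum + z] := by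
  induction l generalizing a with
  | nil => simp [pvP]
  | cons x t ih =>
    simp only [List.cons_append, pvP, ih (a + x), List.sum_cons]
    have h : a + x + t.sum + z = a + (x + t.sum) + z := by ring
    rw [h]

theorem pvSum_eq (l : List Int) (z : Int) : pvSum l z = l.sum + z := by
  induction l with
  | nil => simp [pvSum]
  | cons x t ih => simp [pvSum, ih]; ring

-- B's backward loop is pvBB
theorem pvBBfoldr (l : List (Int × Int × Int)) (z' : Int) :
    l.foldr (fun u (st : Int × Int × Int) =>
        (max (max st.1 |(u.1 - u.2.1) - (st.2.1 - u.1)|) |(u.1 - u.2.2) - (st.2.2 - u.1)|,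
         min st.2.1 u.1, max st.2.2 u.1))
      (0, z', z')
    = pvBB z' l := by
  induction l with
  | nil => rfl
  | cons u t ih =>
    rw [List.foldr_cons, ih]
    rfl

-- MAIN LEMMA: B's backward recursion over the prefix-sum triples computes pvBest
theorem pvMain (xs : List Int) (p lo hi z : Int) :
    pvBB (p + pvSum xs z) (pvTrip p lo hi xs)
    = (pvBest 0 xs (pvMEscan p lo xs) (pvmEscan p hi xs) z,
       p + pvSum xs z - pvMaxT xs z,
       p + pvSum xs z - pvMinT xs z) := by
  induction xs generalizing p lo hi with
  | nil => simp [pvBB, pvTrip, pvBest, pvSum, pvMaxT, pvMinT]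
  | cons x t ih =>
    have hz : p + pvSum (x :: t) z = (p + x) + pvSum t z := by simp [pvSum]; ring
    simp only [pvTrip, pvBB, hz, ih (p + x) (min lo p) (max hi p)]
    simp only [Prod.mk.injEq]
    have hm : ((p + x) + pvSum t z - pvMaxT t z) - (p + x) = pvHMin t z := by
      rw [pvHMinChar]; ring
    have hM : ((p + x) + pvSum t z - pvMinT t z) - (p + x) = pvHMax t z := by
      rw [pvHMaxChar]; ring
    refine ⟨?_, ?_, ?_⟩
    · simp only [hm, hM]
      rfl
    · show min ((p + x) + pvSum t z - pvMaxT t z) (p + x) = (p + x) + pvSum t z - pvMaxT (x :: t) z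
      simp only [pvMaxT]
      rcases le_total (pvSum t z) (pvMaxT t z) with h | h <;>
        simp [max_eq_left, max_eq_right, min_eq_left, min_eq_right, h] <;> omega
    · show max ((p + x) + pvSum t z - pvMinT t z) (p + x) = (p + x) + pvSum t z - pvMinT (x :: t) z
      simp only [pvMinT]
      rcases le_total (pvSum t z) (pvMinT t z) with h | h <;>
        simp [min_eq_left, min_eq_right, max_eq_left, max_eq_right, h] <;> omega

-- ===== VERDICT (by name: the statement is the Claim_ definition above) =====
-- the whole equality for a list of length ≥ 2
theorem pvKey (x0 y : Int) (t : List Int) :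
    maxDiffSubArrays (x0 :: y :: t) = maxDiffSubArrays_alt (x0 :: y :: t) := by
  have hlen : (((x0 :: y :: t).length : Nat) : Int) = (t.length : Int) + 2 := by
    push_cast [List.length_cons]; ring
  have hg1 : ¬(x0 :: y :: t = [] ∨ (((x0 :: y :: t).length : Nat) : Int) ≤ 1) := by
    rintro (h | h)
    · exact absurd h (by simp)
    · rw [hlen] at h; omega
  have hg2 : ¬((((x0 :: y :: t).length : Nat) : Int) ≤ 1) := by
    intro h; rw [hlen] at h; omega
  -- the last element and the rest
  obtain ⟨xs, z, hxz⟩ : ∃ xs z, x0 :: y :: t = xs ++ [z] :=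
    ⟨_, _, (List.dropLast_append_getLast (by simp : x0 :: y :: t ≠ [])).symm⟩
  have hdrop : (x0 :: y :: t).dropLast = xs := by rw [hxz, List.dropLast_concat]
  have hzlast : PySem.List.pyGetD (x0 :: y :: t) (-1) 0 = z := by
    rw [hxz, PySem.List.pyGetD_neg_one_append_singleton]
  unfold maxDiffSubArrays maxDiffSubArrays_alt
  rw [if_neg hg1, if_neg hg2]
  simp only [PySem.List.pyGetD_zero_cons, hzlast]
  -- A's forward loop
  have hTail : (PySem.List.pyRange 1 (((x0 :: y :: t).length : Nat) : Int) 1).map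
      (fun i => PySem.List.pyGetD (x0 :: y :: t) i 0) = y :: t := by
    have h := pvMapRangeTail (x0 :: y :: t)
    simp only [List.tail_cons] at h
    exact h
  have hDrop := pvMapRangeDropLast (x0 :: y :: t)
  have hmA := List.foldl_map (f := fun i => PySem.List.pyGetD (x0 :: y :: t) i 0)
    (g := fun (st : List Int × List Int) x =>
      (st.1 ++ [max (PySem.List.pyGetD st.1 (-1) 0 + x) x],
       st.2 ++ [min (PySem.List.pyGetD st.2 (-1) 0 + x) x]))
    (l := PySem.List.pyRange 1 (((x0 :: y :: t).length : Nat) : Int) 1)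
    (init := (([x0], [x0]) : List Int × List Int))
  rw [hTail] at hmA
  have hA1 := pvFwdA (y :: t) x0 x0 [] []
  simp only [List.nil_append] at hA1
  have eA1 : (PySem.List.pyRange 1 (((x0 :: y :: t).length : Nat) : Int) 1).foldl
      (fun (st : List Int × List Int) i =>
        (st.1 ++ [max (PySem.List.pyGetD st.1 (-1) 0 + PySem.List.pyGetD (x0 :: y :: t) i 0)
            (PySem.List.pyGetD (x0 :: y :: t) i 0)],
         st.2 ++ [min (PySem.List.pyGetD st.2 (-1) 0 + PySem.List.pyGetD (x0 :: y :: t) i 0)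
            (PySem.List.pyGetD (x0 :: y :: t) i 0)]))
      ([x0], [x0])
      = (x0 :: pvTMax x0 (y :: t), x0 :: pvTMin x0 (y :: t)) := hmA.symm.trans hA1
  -- A's backward loop
  have hmB := List.foldr_map (f := fun i => PySem.List.pyGetD (x0 :: y :: t) i 0)
    (g := fun x (st : List Int × List Int) =>
      ([max (PySem.List.pyGetD st.1 0 0 + x) x] ++ st.1,
       [min (PySem.List.pyGetD st.2 0 0 + x) x] ++ st.2))
    (l := PySem.List.pyRange 0 ((((x0 :: y :: t).length : Nat) : Int) - 1) 1)
    (init := (([z], [z]) : List Int × List Int))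
  rw [hDrop] at hmB
  have eA2 : ((PySem.List.pyRange 0 ((((x0 :: y :: t).length : Nat) : Int) - 1) 1).reverse).foldl
      (fun (st : List Int × List Int) i =>
        ([max (PySem.List.pyGetD st.1 0 0 + PySem.List.pyGetD (x0 :: y :: t) i 0)
            (PySem.List.pyGetD (x0 :: y :: t) i 0)] ++ st.1,
         [min (PySem.List.pyGetD st.2 0 0 + PySem.List.pyGetD (x0 :: y :: t) i 0)
            (PySem.List.pyGetD (x0 :: y :: t) i 0)] ++ st.2))
      ([z], [z])
      = (pvGMax ((x0 :: y :: t).dropLast) z, pvGMin ((x0 :: y :: t).dropLast) z) := by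
    rw [List.foldl_reverse]
    exact hmB.symm.trans (pvBwdA ((x0 :: y :: t).dropLast) z)
  rw [eA1, eA2]
  dsimp only
  -- A's slices
  have hE : (x0 :: pvTMax x0 (y :: t)).length = (x0 :: y :: t).length := by
    simp [pvTMax_length]
  have hF : (x0 :: pvTMin x0 (y :: t)).length = (x0 :: y :: t).length := by
    simp [pvTMin_length]
  have h0 : (0 : Int) ≤ (((x0 :: y :: t).length : Nat) : Int) - 1 := by rw [hlen]; omega
  have htn : ((((x0 :: y :: t).length : Nat) : Int) - 1).toNat = (x0 :: y :: t).length - 1 := by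
    omega
  have hsl1 : PySem.List.slice (x0 :: pvTMax x0 (y :: t)) none
      (some ((((x0 :: y :: t).length : Nat) : Int) - 1)) = (x0 :: pvTMax x0 (y :: t)).dropLast := by
    rw [PySem.List.slice_to _ h0, htn, pvTakeLen _ _ hE]
  have hsl2 : PySem.List.slice (x0 :: pvTMin x0 (y :: t)) none
      (some ((((x0 :: y :: t).length : Nat) : Int) - 1)) = (x0 :: pvTMin x0 (y :: t)).dropLast := by
    rw [PySem.List.slice_to _ h0, htn, pvTakeLen _ _ hF]
  have hgmin : (pvGMin ((x0 :: y :: t).dropLast) z).tail.length ≤ (x0 :: y :: t).length - 1 := by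
    simp [pvGMin_length]
  have hgmax : (pvGMax ((x0 :: y :: t).dropLast) z).tail.length ≤ (x0 :: y :: t).length - 1 := by
    simp [pvGMax_length]
  have hsl3 : PySem.List.slice (pvGMin ((x0 :: y :: t).dropLast) z) (some 1)
      (some (((x0 :: y :: t).length : Nat) : Int)) = (pvGMin ((x0 :: y :: t).dropLast) z).tail := by
    rw [PySem.List.slice_toNat _ (by omega) (by omega)]
    simp only [Int.toNat_one, Int.toNat_natCast]
    rw [List.drop_one, List.take_of_length_le hgmin]
  have hsl4 : PySem.List.slice (pvGMax ((x0 :: y :: t).dropLast) z) (some 1)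
      (some (((x0 :: y :: t).length : Nat) : Int)) = (pvGMax ((x0 :: y :: t).dropLast) z).tail := by
    rw [PySem.List.slice_toNat _ (by omega) (by omega)]
    simp only [Int.toNat_one, Int.toNat_natCast]
    rw [List.drop_one, List.take_of_length_le hgmax]
  rw [hsl1, hsl2, hsl3, hsl4]
  -- A's side is pvBest over the max-ending lists
  have hdlE : ((x0 :: y :: t).dropLast).length = ((x0 :: pvTMax x0 (y :: t)).dropLast).length := by
    simp [pvTMax_length]
  have hdlF : ((x0 :: y :: t).dropLast).length = ((x0 :: pvTMin x0 (y :: t)).dropLast).length := by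
    simp [pvTMin_length]
  have hAside := pvMaxPair ((x0 :: y :: t).dropLast) ((x0 :: pvTMax x0 (y :: t)).dropLast)
    ((x0 :: pvTMin x0 (y :: t)).dropLast) z hdlE hdlF (by simp)
  rw [hAside]
  -- the max-ending lists through prefix sums
  have hME : x0 :: pvTMax x0 (y :: t) = pvMEscan 0 0 (x0 :: y :: t) := by
    have h := pvKadaneMax (y :: t) x0 0
    simp only [sub_zero] at h
    simp [pvMEscan, h]
  have hmE : x0 :: pvTMin x0 (y :: t) = pvmEscan 0 0 (x0 :: y :: t) := by
    have h := pvKadaneMin (y :: t) x0 0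
    simp only [sub_zero] at h
    simp [pvmEscan, h]
  rw [hME, hmE, pvMEscan_dropLast, pvmEscan_dropLast, hdrop]
  -- B's side
  have hP : (x0 :: y :: t).foldl
      (fun (P : List Int) x => P ++ [PySem.List.pyGetD P (-1) 0 + x]) [0]
      = 0 :: pvP 0 (x0 :: y :: t) := by
    have h := pvPfold (x0 :: y :: t) 0 []
    simpa using h
  rw [hP]
  -- P's last entry is the total sum
  have hPz : PySem.List.pyGetD (0 :: pvP 0 (x0 :: y :: t)) (-1) 0 = 0 + xs.sum + z := by
    rw [hxz, pvP_snoc, show (0 : Int) :: (pvP 0 xs ++ [0 + xs.sum + z])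
        = (0 :: pvP 0 xs) ++ [0 + xs.sum + z] from rfl,
      PySem.List.pyGetD_neg_one_append_singleton]
  rw [hPz]
  -- the running-extrema loop
  have hSc := pvScanFold (0 :: pvP 0 (x0 :: y :: t)) 0 0 [] []
  simp only [List.nil_append] at hSc
  rw [hSc]
  dsimp only
  -- the zipped triple list
  rw [PySem.List.slice_from_one, List.tail_cons, pvZipTrip, PySem.List.slice_to_neg_one,
    pvTrip_dropLast, hdrop]
  -- the backward loop
  rw [List.foldl_reverse, pvBBfoldr]
  have hz' : (0 : Int) + xs.sum + z = 0 + pvSum xs z := by rw [pvSum_eq]; ring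
  rw [hz', pvMain xs 0 0 0 z]

-- ===== VERDICT (by name: the statement is the Claim_ definition above) =====
theorem maxDiffSubArrays_spec : Claim_equal_maxDiffSubArrays := by
  unfold Claim_equal_maxDiffSubArrays
  intro nums _
  unfold Spec_maxDiffSubArrays
  rcases nums with _ | ⟨x0, _ | ⟨y, t⟩⟩
  · norm_num [maxDiffSubArrays, maxDiffSubArrays_alt]
  · norm_num [maxDiffSubArrays, maxDiffSubArrays_alt]
  · exact pvKey x0 y t
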